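-- pv_equiv track=rewrite | github.com/mscho2014/conversion | merge_cretin_v1.1.py | drop_empty_sections
-- ===== SOURCE A (Python) =====
-- def drop_empty_sections(out_lines, section_names):
--     """
--     Remove output sections that contain no d-lines.
--     This cleans up placeholder sections that only contain comments or blank lines.
--     """
--     targets = set(section_names or [])
--     out = []
--     i = 0
--     n = len(out_lines)
--     removed = []
--     while i < n:
--         ln = out_lines[i]
--         s = ln.strip()
--         if not s.startswith('data '):
--             out.append(ln)
--             i += 1
--             continue
--
--         sec_name = s[5:].strip()
--         block = [ln]
--         i += 1
--         has_d = False
--         while i < n: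
--             block.append(out_lines[i])
--             bs = out_lines[i].strip()
--             if bs.startswith('d '):
--                 has_d = True
--             if bs == 'end data':
--                 i += 1
--                 break
--             i += 1
--
--         if sec_name in targets and not has_d:
--             removed.append(sec_name)
--             continue
--         out.extend(block)
--     return out, removed
-- ===== SOURCE B (Python) =====
-- def drop_empty_sections(out_lines, section_names):
--     """
--     Remove output sections that contain no d-lines.
--     Two passes: first segment the lines into passthrough lines and data-block
--     records (name, lines, has_d) with a one-line-at-a-time state machine,
--     then emit segments, dropping targeted blocks without d-lines.
--     """
--     targets = set(section_names or [])
--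
--     # pass 1: segmentation
--     segments = []
--     cur = None  # open data block: (sec_name, lines, has_d)
--     for ln in out_lines:
--         s = ln.strip()
--         if cur is None:
--             if s.startswith('data '):
--                 cur = (s[5:].strip(), [ln], False)
--             else:
--                 segments.append(ln)
--         else:
--             name, lines, has_d = cur
--             lines.append(ln)
--             if s.startswith('d '):
--                 has_d = True
--             if s == 'end data':
--                 segments.append((name, lines, has_d))
--                 cur = None
--             else:
--                 cur = (name, lines, has_d)
--     if cur is not None:
--         segments.append(cur)
--
--     # pass 2: emission
--     out, removed = [], []
--     for seg in segments:
--         if isinstance(seg, str):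
--             out.append(seg)
--         else:
--             name, lines, has_d = seg
--             if name in targets and not has_d:
--                 removed.append(name)
--             else:
--                 out.extend(lines)
--     return out, removed
-- ===== Notes on version B (the rewrite author's own statement) =====
-- stated objective: alternative
-- what changed: B replaces A's nested while loops (index-driven outer scan with an inner block-collecting loop threading a has_d flag) by two passes: a single-for-loop state machine that segments the lines into passthrough lines and data-block records (name, lines, has_d), then an emit pass over the segments that drops targeted blocks without d-lines.
import Mathlib
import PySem

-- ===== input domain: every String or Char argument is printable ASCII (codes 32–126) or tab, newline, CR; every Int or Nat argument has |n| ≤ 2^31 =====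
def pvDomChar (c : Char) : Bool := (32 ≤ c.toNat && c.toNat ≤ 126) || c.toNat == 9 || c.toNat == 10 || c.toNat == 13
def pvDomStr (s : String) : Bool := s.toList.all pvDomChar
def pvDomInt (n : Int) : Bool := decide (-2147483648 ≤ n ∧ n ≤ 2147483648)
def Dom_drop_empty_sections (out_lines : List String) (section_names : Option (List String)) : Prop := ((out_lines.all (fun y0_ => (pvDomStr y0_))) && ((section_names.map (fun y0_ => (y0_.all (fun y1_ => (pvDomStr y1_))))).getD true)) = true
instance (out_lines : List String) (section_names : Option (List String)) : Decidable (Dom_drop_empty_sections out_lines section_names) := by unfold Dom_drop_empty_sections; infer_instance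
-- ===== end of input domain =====

-- B replaces A's nested while loops by two passes: a one-line-at-a-time state machine that
-- segments the input into passthrough lines and data-block records, then an emit pass.

-- ===== PORT A =====
-- inner while: collect lines into block, set has_d, stop after the first 'end data' line
def dropA_block (rest : List String) (block : List String) (has_d : Bool) : List String × List String × Bool :=
  match rest with
  | [] => (([] : List String), block, has_d)
  | ln :: rest' =>
    let block' := block ++ [ln]
    let bs := PySem.Str.strip ln
    let has_d' := if PySem.Str.startswith bs "d " then true else has_d
    if bs == "end data" then (rest', block', has_d')
    else dropA_block rest' block' has_d'

theorem dropA_block_fst_len (rest block : List String) (has_d : Bool) :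
    (dropA_block rest block has_d).1.length ≤ rest.length := by
  induction rest generalizing block has_d with
  | nil => simp [dropA_block]
  | cons ln rest' ih =>
    simp only [dropA_block]
    split
    · simp
    · exact le_trans (ih _ _) (by simp)

-- outer while over the remaining lines (the tail plays the role of index i)
def dropA_loop (targets : PySem.Set String) (rest : List String) (out removed : List String) :
    List String × List String :=
  match rest with
  | [] => (out, removed)
  | ln :: rest' =>
    let s := PySem.Str.strip ln
    if ¬ PySem.Str.startswith s "data " then
      dropA_loop targets rest' (out ++ [ln]) removed
    else
      let sec_name := PySem.Str.strip (PySem.Str.slice s (some 5) none)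
      let r := dropA_block rest' [ln] false
      if PySem.Set.contains targets sec_name && !r.2.2 then
        dropA_loop targets r.1 out (removed ++ [sec_name])
      else
        dropA_loop targets r.1 (out ++ r.2.1) removed
termination_by rest.length
decreasing_by
  · simp
  · exact Nat.lt_succ_of_le (dropA_block_fst_len _ _ _)
  · exact Nat.lt_succ_of_le (dropA_block_fst_len _ _ _)

def drop_empty_sections (out_lines : List String) (section_names : Option (List String)) :
    List String × List String :=
  let targets := PySem.Set.ofList (section_names.getD [])
  dropA_loop targets out_lines [] []

-- ===== PORT B =====
-- a segment: a passthrough line, or a data-block record (str vs tuple in Source B)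
inductive Seg where
  | line (s : String) : Seg
  | block (name : String) (lines : List String) (has_d : Bool) : Seg
deriving DecidableEq, Repr

-- pass-1 body: fold one line into (segments so far, open block or none)
def segStep (st : List Seg × Option (String × List String × Bool)) (ln : String) :
    List Seg × Option (String × List String × Bool) :=
  let s := PySem.Str.strip ln
  match st.2 with
  | none =>
    if PySem.Str.startswith s "data " then
      (st.1, some (PySem.Str.strip (PySem.Str.slice s (some 5) none), [ln], false))
    else (st.1 ++ [Seg.line ln], none)
  | some (name, lines, has_d) =>
    let lines' := lines ++ [ln]
    let has_d' := if PySem.Str.startswith s "d " then true else has_d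
    if s == "end data" then (st.1 ++ [Seg.block name lines' has_d'], none)
    else (st.1, some (name, lines', has_d'))

-- pass-2 body: emit one segment
def emitStep (targets : PySem.Set String) (acc : List String × List String) (sg : Seg) :
    List String × List String :=
  match sg with
  | Seg.line ln => (acc.1 ++ [ln], acc.2)
  | Seg.block name lines has_d =>
    if PySem.Set.contains targets name && !has_d then (acc.1, acc.2 ++ [name])
    else (acc.1 ++ lines, acc.2)

def drop_empty_sections_alt (out_lines : List String) (section_names : Option (List String)) :
    List String × List String :=
  let targets := PySem.Set.ofList (section_names.getD [])
  let r := out_lines.foldl segStep (([] : List Seg), none)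
  let segments :=
    match r.2 with
    | none => r.1
    | some (name, lines, has_d) => r.1 ++ [Seg.block name lines has_d]
  segments.foldl (emitStep targets) (([] : List String), ([] : List String))

-- ===== PRECONDITION & SPEC =====
def Spec_drop_empty_sections (out_lines : List String) (section_names : Option (List String)) (out : List String × List String) : Prop := out = drop_empty_sections_alt out_lines section_names
instance (out_lines : List String) (section_names : Option (List String)) (out : List String × List String) : Decidable (Spec_drop_empty_sections out_lines section_names out) := by unfold Spec_drop_empty_sections; infer_instance

-- ===== CLAIM (what is proved, stated in full; the proofs are below) =====
def Claim_equal_drop_empty_sections : Prop := ∀ (out_lines : List String) (section_names : Option (List String)), Dom_drop_empty_sections out_lines section_names → Spec_drop_empty_sections out_lines section_names (drop_empty_sections out_lines section_names)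

-- ===== LEMMAS AND PROOFS =====

-- proof-side splitter: (lines up to and incl. the first 'end data', remainder, end found?)
def splitB : List String → List String × List String × Bool
  | [] => (([] : List String), ([] : List String), false)
  | ln :: rest =>
    if PySem.Str.strip ln == "end data" then ([ln], rest, true)
    else
      let p := splitB rest
      (ln :: p.1, p.2.1, p.2.2)

theorem splitB_len (rest : List String) : (splitB rest).2.1.length ≤ rest.length := by
  induction rest with
  | nil => simp [splitB]
  | cons ln rest' ih =>
    simp only [splitB]
    split
    · simp
    · exact le_trans ih (by simp)

theorem splitB_not_found (rest : List String) (h : (splitB rest).2.2 = false) :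
    (splitB rest).1 = rest ∧ (splitB rest).2.1 = [] := by
  induction rest with
  | nil => simp [splitB]
  | cons ln rest' ih =>
    by_cases hend : PySem.Str.strip ln == "end data"
    · simp only [splitB, if_pos hend] at h
      cases h
    · simp only [splitB, if_neg hend] at h ⊢
      exact ⟨by rw [(ih h).1], (ih h).2⟩

-- A's inner loop, characterised by splitB
theorem dropA_block_eq (rest : List String) (block : List String) (has_d : Bool) :
    dropA_block rest block has_d =
      ((splitB rest).2.1, block ++ (splitB rest).1,
        has_d || (splitB rest).1.any fun b => PySem.Str.startswith (PySem.Str.strip b) "d ") := by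
  induction rest generalizing block has_d with
  | nil => simp [dropA_block, splitB]
  | cons ln rest' ih =>
    simp only [dropA_block, splitB]
    by_cases hend : PySem.Str.strip ln == "end data"
    · simp [hend, Bool.or_comm]
    · simp only [hend]
      rw [ih]
      cases has_d <;> simp

-- middle formulation: A's outer loop with the inner loop replaced by splitB + any
def midLoop (targets : PySem.Set String) (rest : List String) (out removed : List String) :
    List String × List String :=
  match rest with
  | [] => (out, removed)
  | ln :: rest' =>
    let s := PySem.Str.strip ln
    if ¬ PySem.Str.startswith s "data " then
      midLoop targets rest' (out ++ [ln]) removed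
    else
      let sec_name := PySem.Str.strip (PySem.Str.slice s (some 5) none)
      let p := splitB rest'
      if PySem.Set.contains targets sec_name &&
          !(p.1.any fun b => PySem.Str.startswith (PySem.Str.strip b) "d ") then
        midLoop targets p.2.1 out (removed ++ [sec_name])
      else
        midLoop targets p.2.1 (out ++ ln :: p.1) removed
termination_by rest.length
decreasing_by
  all_goals first
    | exact Nat.lt_succ_of_le (splitB_len _)
    | simp

theorem dropA_eq_mid (targets : PySem.Set String) (rest out removed : List String) :
    dropA_loop targets rest out removed = midLoop targets rest out removed := by
  match rest with
  | [] => simp [dropA_loop, midLoop]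
  | ln :: rest' =>
    rw [dropA_loop, midLoop]
    by_cases hdata : PySem.Str.startswith (PySem.Str.strip ln) "data "
    · conv_lhs => rw [if_neg (by simpa using hdata)]
      conv_rhs => rw [if_neg (by simpa using hdata)]
      rw [dropA_block_eq]
      simp only [Bool.false_or, List.singleton_append]
      split
      · exact dropA_eq_mid targets (splitB rest').2.1 out _
      · exact dropA_eq_mid targets (splitB rest').2.1 _ removed
    · conv_lhs => rw [if_pos hdata]
      conv_rhs => rw [if_pos hdata]
      exact dropA_eq_mid targets rest' (out ++ [ln]) removed
termination_by rest.length
decreasing_by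
  all_goals first
    | exact Nat.lt_succ_of_le (splitB_len _)
    | simp

-- the segment list B's pass 1 produces, characterised recursively via splitB
def segRun : List String → List Seg
  | [] => []
  | ln :: rest' =>
    if ¬ PySem.Str.startswith (PySem.Str.strip ln) "data " then Seg.line ln :: segRun rest'
    else
      Seg.block (PySem.Str.strip (PySem.Str.slice (PySem.Str.strip ln) (some 5) none))
          (ln :: (splitB rest').1)
          ((splitB rest').1.any fun b => PySem.Str.startswith (PySem.Str.strip b) "d ") ::
        segRun (splitB rest').2.1
termination_by rest => rest.length
decreasing_by
  all_goals first
    | exact Nat.lt_succ_of_le (splitB_len _)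
    | simp

-- finalisation of pass 1 (the 'if cur is not None' flush)
def segFin (st : List Seg × Option (String × List String × Bool)) : List Seg :=
  match st.2 with
  | none => st.1
  | some (name, lines, has_d) => st.1 ++ [Seg.block name lines has_d]

-- folding segStep from inside an open block, characterised by splitB
theorem seg_inner (rest : List String) (segs : List Seg) (name : String)
    (lines : List String) (has_d : Bool) :
    List.foldl segStep (segs, some (name, lines, has_d)) rest =
      (if (splitB rest).2.2 then
        List.foldl segStep
          (segs ++ [Seg.block name (lines ++ (splitB rest).1)
            (has_d || (splitB rest).1.any fun b => PySem.Str.startswith (PySem.Str.strip b) "d ")],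
            none) (splitB rest).2.1
      else
        (segs, some (name, lines ++ (splitB rest).1,
          has_d || (splitB rest).1.any fun b => PySem.Str.startswith (PySem.Str.strip b) "d "))) := by
  induction rest generalizing lines has_d with
  | nil => simp [splitB]
  | cons ln rest' ih =>
    simp only [List.foldl_cons]
    by_cases hend : PySem.Str.strip ln == "end data"
    · have hs : PySem.Str.strip ln = "end data" := eq_of_beq hend
      have hnd : PySem.Chars.startswith (PySem.Chars.strip ln.toList) ['d', ' '] = false := by
        rw [← PySem.Str.toList_strip, hs]; decide
      simp only [segStep, splitB, if_pos hend]
      simp [hnd]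
    · simp only [segStep, splitB, if_neg hend]
      rw [ih]
      by_cases hfound : (splitB rest').2.2
      · simp only [hfound]
        by_cases hp : PySem.Chars.startswith (PySem.Chars.strip ln.toList) ['d', ' '] = true <;>
          simp [hp]
      · simp only [hfound]
        by_cases hp : PySem.Chars.startswith (PySem.Chars.strip ln.toList) ['d', ' '] = true <;>
          simp [hp]

-- pass 1 (with finalisation) produces exactly segRun
theorem seg_run (rest : List String) (segs : List Seg) :
    segFin (List.foldl segStep (segs, none) rest) = segs ++ segRun rest := by
  match rest with
  | [] => simp [segFin, segRun]
  | ln :: rest' =>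
    rw [segRun]
    by_cases hdata : PySem.Str.startswith (PySem.Str.strip ln) "data "
    · simp only [List.foldl_cons, segStep, if_pos hdata, if_neg (not_not_intro hdata)]
      rw [seg_inner]
      by_cases hfound : (splitB rest').2.2
      · simp only [hfound, if_true]
        rw [seg_run (splitB rest').2.1]
        simp
      · simp only [hfound, Bool.false_eq_true, if_false, segFin]
        have hnf := splitB_not_found rest' (by simpa using hfound)
        rw [hnf.2]
        simp [segRun]
    · simp only [List.foldl_cons, segStep, if_neg hdata, if_pos hdata]
      rw [seg_run rest']
      simp
termination_by rest.length
decreasing_by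
  all_goals first
    | exact Nat.lt_succ_of_le (splitB_len _)
    | simp

-- pass 2 over segRun computes midLoop
theorem emit_run (targets : PySem.Set String) (rest : List String)
    (acc : List String × List String) :
    List.foldl (emitStep targets) acc (segRun rest) = midLoop targets rest acc.1 acc.2 := by
  match rest with
  | [] => simp [segRun, midLoop]
  | ln :: rest' =>
    rw [segRun, midLoop]
    by_cases hdata : PySem.Str.startswith (PySem.Str.strip ln) "data "
    · rw [if_neg (by simpa using hdata), if_neg (by simpa using hdata)]
      simp only [List.foldl_cons, emitStep]
      split
      · exact emit_run targets (splitB rest').2.1 _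
      · exact emit_run targets (splitB rest').2.1 _
    · rw [if_pos hdata, if_pos hdata]
      simp only [List.foldl_cons, emitStep]
      exact emit_run targets rest' _
termination_by rest.length
decreasing_by
  all_goals first
    | exact Nat.lt_succ_of_le (splitB_len _)
    | simp

-- ===== VERDICT (by name: the statement is the Claim_ definition above) =====
theorem drop_empty_sections_spec : Claim_equal_drop_empty_sections := by
  intro out_lines section_names _
  unfold Spec_drop_empty_sections drop_empty_sections drop_empty_sections_alt
  rw [dropA_eq_mid]
  show midLoop (PySem.Set.ofList (section_names.getD [])) out_lines [] [] =
    List.foldl (emitStep (PySem.Set.ofList (section_names.getD []))) ([], [])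
      (segFin (List.foldl segStep (([] : List Seg), none) out_lines))
  rw [seg_run out_lines [], List.nil_append, emit_run]
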